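-- pv_equiv track=rewrite | github.com/ymanish/Spermatogenesis | backend/NucFreeEnergy/methods/PolyCG/polycg/utils/seq.py | unique_seq_of_chars
-- ===== SOURCE A (Python) =====
-- def unique_seq_of_chars(oli_size: int, chars: str, N=None) -> str:
--     seq = ""
--     if N is None:
--         N = oli_size ** len(chars)
--
--     def fit2seq(seq, oli):
--         n = len(oli)
--         if oli in seq:
--             return seq
--         for i in range(1, n):
--             if seq[-n + i :] == oli[: n - i]:
--                 return seq + oli[-i:]
--         return seq + oli
--
--     def _genloop(oli_size, seq, chars, oli, curid):
--         if len(oli) == oli_size: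
--             if len(set(oli)) > 1:
--                 return fit2seq(seq, oli)
--             return seq
--         if len(oli) == oli_size - 1 and curid == 0:
--             curid += 1
--         for i in range(curid, len(chars)):
--             seq = _genloop(oli_size, seq, chars, oli + chars[i], curid)
--             if len(seq) >= N:
--                 return seq
--         return seq
--
--     for i in range(len(chars)):
--         seq = fit2seq(seq, chars[i] * oli_size)
--         seq = _genloop(oli_size, seq, chars, chars[i], i)
--         if len(seq) >= N:
--             seq = seq[:N]
--             break
--     return seq
-- ===== SOURCE B (Python) =====
-- def unique_seq_of_chars(oli_size: int, chars: str, N=None) -> str: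
--     if N is None:
--         N = oli_size ** len(chars)
--
--     def merge(seq, oli):
--         # append oli, overlapping the longest proper prefix of oli that seq ends with
--         if oli in seq:
--             return seq
--         for k in range(len(oli) - 1, 0, -1):
--             if seq.endswith(oli[:k]):
--                 return seq + oli[k:]
--         return seq + oli
--
--     seq = ""
--     for i in range(len(chars)):
--         seq = merge(seq, chars[i] * oli_size)
--         # explicit stack-based DFS replacing the recursive _genloop
--         stack = [(chars[i], i)]
--         while stack:
--             oli, curid = stack.pop()
--             if len(oli) == oli_size:
--                 if len(set(oli)) > 1:
--                     seq = merge(seq, oli)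
--                 kids = []
--             else:
--                 if len(oli) == oli_size - 1 and curid == 0:
--                     curid = 1
--                 kids = [(oli + chars[j], curid) for j in range(curid, len(chars))]
--             if kids:
--                 stack.extend(reversed(kids))
--             elif len(seq) >= N:
--                 break
--         if len(seq) >= N:
--             return seq[:N]
--     return seq
-- ===== Notes on version B (the rewrite author's own statement) =====
-- stated objective: alternative
-- what changed: The recursive _genloop is replaced by an explicit stack machine (frames of (oligomer, curid) pushed in reverse, popped left-to-right, the length>=N early exit checked after each frame that yields no children), and the overlap merge scans candidate overlap lengths descending with str.endswith instead of ascending negative-slice comparisons.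
import Mathlib
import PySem

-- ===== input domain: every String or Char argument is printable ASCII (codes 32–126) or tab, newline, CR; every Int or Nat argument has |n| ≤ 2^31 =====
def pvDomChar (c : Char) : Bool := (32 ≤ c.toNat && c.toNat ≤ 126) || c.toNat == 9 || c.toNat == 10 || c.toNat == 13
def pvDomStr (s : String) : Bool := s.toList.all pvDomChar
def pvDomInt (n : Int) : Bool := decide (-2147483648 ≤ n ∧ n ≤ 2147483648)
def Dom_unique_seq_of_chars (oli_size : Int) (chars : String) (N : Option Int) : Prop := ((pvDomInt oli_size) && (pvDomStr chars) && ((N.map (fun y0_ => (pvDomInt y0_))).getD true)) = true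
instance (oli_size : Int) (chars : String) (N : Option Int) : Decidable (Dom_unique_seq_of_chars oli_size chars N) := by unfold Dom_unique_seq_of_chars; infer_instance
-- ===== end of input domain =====

-- B replaces A's recursive _genloop by an explicit stack-based DFS and scans overlap
-- lengths descending with endswith in the merge helper (objective: alternative, same cost).

-- ===== PORT A =====
-- fit2seq: the for-loop with early return, over range(1, n)
def fitA_loop (seq oli : List Char) : List Int → List Char
  | [] => seq ++ oli
  | i :: rest =>
    if PySem.List.slice seq (some (-(oli.length : Int) + i)) none
        = PySem.List.slice oli none (some ((oli.length : Int) - i)) then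
      seq ++ PySem.List.slice oli (some (-i)) none
    else fitA_loop seq oli rest

def fitA (seq oli : List Char) : List Char :=
  if PySem.Chars.isIn oli seq then seq
  else fitA_loop seq oli (PySem.List.pyRange 1 (oli.length : Int) 1)

-- _genloop; fuel (= remaining recursion depth) only makes the recursion total:
-- from the entry point (fuel = oli_size.toNat, len(oli) = 1) it never runs out.
def genAFor (N : Int) (chars : List Char) (g : List Char → List Char → Int → List Char) :
    List Int → List Char → List Char → Int → List Char
  | [], seq, _, _ => seq
  | i :: rest, seq, oli, curid =>
    let s := g seq (oli ++ [PySem.List.pyGetD chars i ' ']) curid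
    if (s.length : Int) ≥ N then s else genAFor N chars g rest s oli curid

def genA (os N : Int) (chars : List Char) : Nat → List Char → List Char → Int → List Char
  | 0, seq, oli, _ =>
    if (oli.length : Int) = os then
      if 1 < (PySem.Set.ofList oli).length then fitA seq oli else seq
    else seq
  | fuel + 1, seq, oli, curid =>
    if (oli.length : Int) = os then
      if 1 < (PySem.Set.ofList oli).length then fitA seq oli else seq
    else
      let curid' := if (oli.length : Int) = os - 1 ∧ curid = 0 then curid + 1 else curid
      genAFor N chars (genA os N chars fuel) (PySem.List.pyRange curid' (chars.length : Int) 1) seq oli curid'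

-- the outer for-loop over range(len(chars)) with its break
def loopA (os N : Int) (chars : List Char) : List Int → List Char → List Char
  | [], seq => seq
  | i :: is, seq =>
    let c := PySem.List.pyGetD chars i ' '
    let s1 := fitA seq (PySem.List.pyRepeat [c] os)
    let s2 := genA os N chars os.toNat s1 [c] i
    if (s2.length : Int) ≥ N then PySem.List.slice s2 none (some N) else loopA os N chars is s2

def unique_seq_of_chars (oli_size : Int) (chars : String) (N : Option Int) : String :=
  let NN : Int := match N with
    | none => oli_size ^ chars.toList.length
    | some n => n
  String.ofList (loopA oli_size NN chars.toList (PySem.List.pyRange 0 (chars.toList.length : Int) 1) [])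

-- ===== PORT B =====
-- merge: scan overlap lengths k = n-1 .. 1 descending, test with endswith
def fitB_loop (seq oli : List Char) : List Int → List Char
  | [] => seq ++ oli
  | k :: ks =>
    if PySem.Chars.endswith seq (PySem.List.slice oli none (some k)) then
      seq ++ PySem.List.slice oli (some k) none
    else fitB_loop seq oli ks

def fitB (seq oli : List Char) : List Char :=
  if PySem.Chars.isIn oli seq then seq
  else fitB_loop seq oli (PySem.List.pyRange ((oli.length : Int) - 1) 0 (-1))

-- weight of a stack frame, for termination of the DFS loop only
def pvW (m : Nat) (fr : Nat × List Char × Int) : Nat := (m + 2 + (-(fr.2.2)).toNat) ^ fr.1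

theorem pvW_pos (m : Nat) (fr : Nat × List Char × Int) : 0 < pvW m fr :=
  Nat.pow_pos (Nat.lt_of_lt_of_le Nat.zero_lt_two
    (Nat.le_trans (Nat.le_add_left 2 m) (Nat.le_add_right (m + 2) _)))

theorem pvTail_lt (m : Nat) (fr : Nat × List Char × Int) (rest : List (Nat × List Char × Int)) :
    (List.map (pvW m) rest).sum < (List.map (pvW m) (fr :: rest)).sum := by
  rw [List.map_cons, List.sum_cons]
  exact Nat.lt_add_of_pos_left (pvW_pos m fr)

theorem pvSum_map_const {α : Type} (l : List α) (c : Nat) : (l.map (fun _ => c)).sum = l.length * c := by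
  induction l with
  | nil => exact (Nat.zero_mul c).symm
  | cons x xs ih => rw [List.map_cons, List.sum_cons, ih, List.length_cons, Nat.succ_mul, Nat.add_comm]

theorem pvKids_sum_lt (m f' : Nat) (curid c' : Int)
    (hc : (-c').toNat ≤ (-curid).toNat) (g : Int → List Char) :
    ((PySem.List.pyRange c' (m : Int) 1).map (fun j => pvW m (f', g j, c'))).sum
      < pvW m (f' + 1, ([] : List Char), curid) := by
  have h1 : (fun j => pvW m (f', g j, c')) = (fun (_ : Int) => (m + 2 + (-c').toNat) ^ f') :=
    funext (fun _ => rfl)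
  rw [h1, pvSum_map_const, PySem.List.length_pyRange_one]
  have hL : ((m : Int) - c').toNat ≤ m + (-c').toNat := by
    refine Int.toNat_le.mpr ?_
    rw [Int.sub_eq_add_neg, Nat.cast_add]
    exact Int.add_le_add_left (Int.self_le_toNat _) _
  have hB : 0 < m + 2 + (-c').toNat := Nat.lt_of_lt_of_le Nat.zero_lt_two
    (Nat.le_trans (Nat.le_add_left 2 m) (Nat.le_add_right (m + 2) _))
  refine Nat.lt_of_le_of_lt (Nat.mul_le_mul_right _ hL) ?_
  have hlt : m + (-c').toNat < m + 2 + (-c').toNat :=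
    Nat.add_lt_add_right (Nat.lt_add_of_pos_right Nat.zero_lt_two) _
  have hstep : (m + (-c').toNat) * (m + 2 + (-c').toNat) ^ f' < (m + 2 + (-c').toNat) ^ (f' + 1) := by
    rw [Nat.pow_succ']
    exact (Nat.mul_lt_mul_right (Nat.pow_pos hB)).mpr hlt
  exact Nat.lt_of_lt_of_le hstep (Nat.pow_le_pow_left (Nat.add_le_add_left hc _) _)

theorem pvPush_lt (m f' : Nat) (oli : List Char) (curid : Int) (p : Prop) [Decidable p]
    (hp : p → curid = 0) (g : Int → List Char) (rest : List (Nat × List Char × Int)) :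
    (List.map (pvW m)
        ((PySem.List.pyRange (if p then curid + 1 else curid) (m : Int) 1).map
          (fun j => (f', g j, if p then curid + 1 else curid)) ++ rest)).sum
      < (List.map (pvW m) ((f'.succ, oli, curid) :: rest)).sum := by
  have hc : (-(if p then curid + 1 else curid)).toNat ≤ (-curid).toNat := by
    by_cases h : p
    · rw [if_pos h, hp h]; exact Nat.zero_le _
    · rw [if_neg h]
  rw [List.map_append, List.sum_append, List.map_cons, List.sum_cons, List.map_map]
  exact Nat.add_lt_add_right (pvKids_sum_lt m f' curid _ hc g) _

-- the while-loop over the explicit stack (head = top); each frame carries a fuel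
-- bound (= oli_size.toNat at the root) that only makes the loop total
def runB (os N : Int) (chars : List Char) (stack : List (Nat × List Char × Int)) (seq : List Char) : List Char :=
  match stack with
  | [] => seq
  | (f, oli, curid) :: rest =>
    if (oli.length : Int) = os then
      let s := if 1 < (PySem.Set.ofList oli).length then fitB seq oli else seq
      if (s.length : Int) ≥ N then s else runB os N chars rest s
    else
      let curid' := if (oli.length : Int) = os - 1 ∧ curid = 0 then curid + 1 else curid
      match f with
      | 0 => if (seq.length : Int) ≥ N then seq else runB os N chars rest seq
      | f' + 1 =>
        let kids := (PySem.List.pyRange curid' (chars.length : Int) 1).map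
            (fun j => (f', oli ++ [PySem.List.pyGetD chars j ' '], curid'))
        if kids.isEmpty then (if (seq.length : Int) ≥ N then seq else runB os N chars rest seq)
        else runB os N chars (kids ++ rest) seq
termination_by (stack.map (pvW chars.length)).sum
decreasing_by
  · exact pvTail_lt chars.length (f, oli, curid) rest
  · exact pvTail_lt chars.length (0, oli, curid) rest
  · exact pvTail_lt chars.length (f' + 1, oli, curid) rest
  · exact pvPush_lt chars.length f' oli curid _ (fun hh => hh.2)
      (fun j => oli ++ [PySem.List.pyGetD chars j ' ']) rest

def loopB (os N : Int) (chars : List Char) : List Int → List Char → List Char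
  | [], seq => seq
  | i :: is, seq =>
    let c := PySem.List.pyGetD chars i ' '
    let s1 := fitB seq (PySem.List.pyRepeat [c] os)
    let s2 := runB os N chars [(os.toNat, [c], i)] s1
    if (s2.length : Int) ≥ N then PySem.List.slice s2 none (some N) else loopB os N chars is s2

def unique_seq_of_chars_alt (oli_size : Int) (chars : String) (N : Option Int) : String :=
  let NN : Int := match N with
    | none => oli_size ^ chars.toList.length
    | some n => n
  String.ofList (loopB oli_size NN chars.toList (PySem.List.pyRange 0 (chars.toList.length : Int) 1) [])

-- ===== PRECONDITION & SPEC =====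
-- Pre_ excludes oli_size < 1 with nonempty chars: there Python A recurses without
-- bound on oli length and raises RecursionError (it never returns).
def Pre_unique_seq_of_chars (oli_size : Int) (chars : String) (N : Option Int) : Prop :=
  1 ≤ oli_size ∨ chars = ""
instance (oli_size : Int) (chars : String) (N : Option Int) : Decidable (Pre_unique_seq_of_chars oli_size chars N) := by unfold Pre_unique_seq_of_chars; infer_instance

def pvWitness_unique_seq_of_chars : Int × String × Option Int := (2, "ab", none)

def Spec_unique_seq_of_chars (oli_size : Int) (chars : String) (N : Option Int) (out : String) : Prop := out = unique_seq_of_chars_alt oli_size chars N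
instance (oli_size : Int) (chars : String) (N : Option Int) (out : String) : Decidable (Spec_unique_seq_of_chars oli_size chars N out) := by unfold Spec_unique_seq_of_chars; infer_instance

-- ===== CLAIM (what is proved, stated in full; the proofs are below) =====
def Claim_equal_unique_seq_of_chars : Prop := ∀ (oli_size : Int) (chars : String) (N : Option Int), Dom_unique_seq_of_chars oli_size chars N → Pre_unique_seq_of_chars oli_size chars N → Spec_unique_seq_of_chars oli_size chars N (unique_seq_of_chars oli_size chars N)

-- ===== LEMMAS AND PROOFS =====
theorem fit_cond_iff (seq oli : List Char) (i : Int) (h1 : 1 ≤ i) (h2 : i < (oli.length : Int)) :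
    (PySem.List.slice seq (some (-(oli.length : Int) + i)) none
        = PySem.List.slice oli none (some ((oli.length : Int) - i)))
      ↔ PySem.Chars.endswith seq (PySem.List.slice oli none (some ((oli.length : Int) - i))) = true := by
  set k : Int := (oli.length : Int) - i with hk
  have hk0 : 0 < k := by omega
  have hkl : k.toNat < oli.length := by omega
  have hcast : k = ((k.toNat : Nat) : Int) := by omega
  have hstart : -(oli.length : Int) + i = -((k.toNat : Nat) : Int) := by omega
  rw [hstart, hcast, PySem.List.slice_from_neg_natCast _ _ (by omega),
    PySem.List.slice_to_natCast, PySem.Chars.endswith_iff]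
  have hlen : (oli.take k.toNat).length = k.toNat := by
    simp [List.length_take]; omega
  constructor
  · intro h
    rw [← h]
    exact List.drop_suffix _ _
  · intro h
    have h2 := List.suffix_iff_eq_drop.mp h
    rw [hlen] at h2
    exact h2.symm
theorem fit_body_eq (oli : List Char) (i : Int) (h1 : 1 ≤ i) (h2 : i < (oli.length : Int)) :
    PySem.List.slice oli (some ((oli.length : Int) - i)) none
      = PySem.List.slice oli (some (-i)) none := by
  have hcast : -i = -((i.toNat : Nat) : Int) := by omega
  rw [hcast, PySem.List.slice_from_neg_natCast _ _ (by omega),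
    PySem.List.slice_from (ha := by omega)]
  congr 1
  omega

theorem fitB_loop_map (seq oli : List Char) :
    ∀ is : List Int, (∀ i ∈ is, 1 ≤ i ∧ i < (oli.length : Int)) →
      fitB_loop seq oli (is.map (fun i => (oli.length : Int) - i)) = fitA_loop seq oli is := by
  intro is
  induction is with
  | nil => intro _; rfl
  | cons i tl ih =>
    intro hmem
    obtain ⟨h1, h2⟩ := hmem i (by simp)
    simp only [List.map_cons, fitB_loop, fitA_loop]
    by_cases hc : PySem.List.slice seq (some (-(oli.length : Int) + i)) none
        = PySem.List.slice oli none (some ((oli.length : Int) - i))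
    · rw [if_pos ((fit_cond_iff seq oli i h1 h2).mp hc), if_pos hc, fit_body_eq oli i h1 h2]
    · rw [if_neg (fun hB => hc ((fit_cond_iff seq oli i h1 h2).mpr hB)), if_neg hc]
      exact ih (fun j hj => hmem j (List.mem_cons_of_mem _ hj))

theorem range_rev (n : Int) :
    PySem.List.pyRange (n - 1) 0 (-1) = (PySem.List.pyRange 1 n 1).map (fun i => n - i) := by
  rw [PySem.List.pyRange_neg_one, PySem.List.pyRange_one, List.map_map]
  have he : n - 1 - 0 = n - 1 := by omega
  rw [he]
  apply List.map_congr_left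
  intro k _
  simp [Function.comp]
  omega

theorem fit_eq (seq oli : List Char) : fitA seq oli = fitB seq oli := by
  rw [fitA, fitB, range_rev]
  by_cases h : PySem.Chars.isIn oli seq = true
  · rw [if_pos h, if_pos h]
  · rw [if_neg h, if_neg h]
    exact (fitB_loop_map seq oli _ (fun i hi =>
      (PySem.List.mem_pyRange_one).mp hi)).symm

theorem sim_leaf (os N : Int) (chars : List Char) (f : Nat) (oli : List Char) (curid : Int)
    (rest : List (Nat × List Char × Int)) (seq : List Char) (hleaf : (oli.length : Int) = os) :
    runB os N chars ((f, oli, curid) :: rest) seq =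
      (if ((genA os N chars f seq oli curid).length : Int) ≥ N then genA os N chars f seq oli curid
       else runB os N chars rest (genA os N chars f seq oli curid)) := by
  conv_lhs => rw [runB]
  cases f with
  | zero => rw [genA, if_pos hleaf, if_pos hleaf]; simp only [fit_eq]
  | succ f => rw [genA, if_pos hleaf, if_pos hleaf]; simp only [fit_eq]

theorem sim_for (os N : Int) (chars : List Char) (f : Nat)
    (ihf : ∀ (oli : List Char) (curid : Int) rest seq,
      runB os N chars ((f, oli, curid) :: rest) seq =
        (if ((genA os N chars f seq oli curid).length : Int) ≥ N then genA os N chars f seq oli curid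
         else runB os N chars rest (genA os N chars f seq oli curid))) :
    ∀ (is : List Int) (oli : List Char) (curid : Int) (rest : List (Nat × List Char × Int)) (seq : List Char),
      ((seq.length : Int) < N ∨ is ≠ []) →
      runB os N chars ((is.map (fun j => (f, oli ++ [PySem.List.pyGetD chars j ' '], curid))) ++ rest) seq =
        (if ((genAFor N chars (genA os N chars f) is seq oli curid).length : Int) ≥ N then genAFor N chars (genA os N chars f) is seq oli curid
         else runB os N chars rest (genAFor N chars (genA os N chars f) is seq oli curid)) := by
  intro is
  induction is with
  | nil =>
    intro oli curid rest seq h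
    rcases h with h | h
    · simp only [List.map_nil, List.nil_append, genAFor]
      rw [if_neg (by omega)]
    · exact absurd rfl h
  | cons i tl ih =>
    intro oli curid rest seq _
    simp only [List.map_cons, List.cons_append, genAFor]
    rw [ihf]
    by_cases hN : ((genA os N chars f seq (oli ++ [PySem.List.pyGetD chars i ' ']) curid).length : Int) ≥ N
    · simp only [if_pos hN]
    · simp only [if_neg hN]
      exact ih oli curid rest _ (Or.inl (by omega))

theorem sim (os N : Int) (chars : List Char) :
    ∀ (f : Nat) (oli : List Char) (curid : Int) (rest : List (Nat × List Char × Int)) (seq : List Char),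
      runB os N chars ((f, oli, curid) :: rest) seq =
        (if ((genA os N chars f seq oli curid).length : Int) ≥ N then genA os N chars f seq oli curid
         else runB os N chars rest (genA os N chars f seq oli curid)) := by
  intro f
  induction f with
  | zero =>
    intro oli curid rest seq
    by_cases hleaf : (oli.length : Int) = os
    · exact sim_leaf os N chars 0 oli curid rest seq hleaf
    · conv_lhs => rw [runB]
      rw [genA]
      dsimp only
      rw [if_neg hleaf, if_neg hleaf]
  | succ f ihf =>
    intro oli curid rest seq
    by_cases hleaf : (oli.length : Int) = os
    · exact sim_leaf os N chars (f + 1) oli curid rest seq hleaf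
    · conv_lhs => rw [runB]
      rw [genA]
      dsimp only
      rw [if_neg hleaf, if_neg hleaf]
      by_cases hkids : PySem.List.pyRange
          (if (oli.length : Int) = os - 1 ∧ curid = 0 then curid + 1 else curid)
          (chars.length : Int) 1 = []
      · rw [hkids]
        simp only [List.map_nil, List.isEmpty_nil, genAFor, if_true]
      · have hmapne : (PySem.List.pyRange
            (if (oli.length : Int) = os - 1 ∧ curid = 0 then curid + 1 else curid)
            (chars.length : Int) 1).map
              (fun j => (f, oli ++ [PySem.List.pyGetD chars j ' '],
                if (oli.length : Int) = os - 1 ∧ curid = 0 then curid + 1 else curid)) ≠ [] := by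
          simpa using hkids
        rw [if_neg (by simpa [List.isEmpty_iff] using hmapne)]
        exact sim_for os N chars f ihf _ _ _ rest seq (Or.inr hkids)

theorem loop_eq (os N : Int) (chars : List Char) :
    ∀ (is : List Int) (seq : List Char), loopA os N chars is seq = loopB os N chars is seq := by
  intro is
  induction is with
  | nil => intro seq; rfl
  | cons i tl ih =>
    intro seq
    simp only [loopA, loopB]
    rw [fit_eq, sim]
    have hrun : ∀ s, runB os N chars [] s = s := fun s => by rw [runB]
    rw [hrun, ite_self]
    simp only [ih]

-- ===== VERDICT (by name: the statement is the Claim_ definition above) =====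
theorem unique_seq_of_chars_spec : Claim_equal_unique_seq_of_chars := by
  intro oli_size chars N _ _
  unfold Spec_unique_seq_of_chars unique_seq_of_chars unique_seq_of_chars_alt
  simp only [loop_eq]
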